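-- pv_equiv track=rewrite | github.com/Jamalijama/SCoV2-VAR | FastAligner.py | ham_distance0
-- ===== SOURCE A (Python) =====
-- lst_deg_base = ['R', 'Y', 'M', 'K', 'S', 'W', 'H', 'B', 'V', 'D', 'N']
--
-- dict_deg_base = {'R': ['A', 'G'], 'Y': ['C', 'T'], 'M': ['A', 'C'], 'K': ['G', 'T'], 'S': ['G', 'C'],
--                  'W': ['A', 'T'], 'H': ['A', 'T', 'C'], 'B': ['G', 'T', 'C'], 'V': ['G', 'A', 'C'],
--                  'D': ['G', 'A', 'T'], 'N': ['A', 'T', 'C', 'G']}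
--
-- def ham_distance0(seq0, seq1):
--     '''
--     Parameters
--     ----------
--     seq0 : String
--         DESCRIPTION:
--             One of the two sequences to calculate Hamming distance.
--     seq1 : String
--         DESCRIPTION:
--             The other of the two sequences to calculate Hamming distance.
--
--     Returns
--     -------
--     TYPE: int
--         DESCRIPTION:
--             A Hamming editing distance of between two sequences.
--     '''
--     count = 0
--     for xi, yi in zip(seq0, seq1):
--         if xi != yi:
--             if yi in lst_deg_base:
--                 lst_yi = dict_deg_base[yi]
--                 if xi not in lst_yi:
--                     count += 1
--             else:
--                 count += 1
--
--     return count
--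
-- seq1 = 'ACCACATTCGAAGTTTACCGTCGACCTCTCGCGATCTCCGAGCTACGAGACGTCGTACGTAGC'
-- ===== SOURCE B (Python) =====
-- dict_deg_base = {'R': ['A', 'G'], 'Y': ['C', 'T'], 'M': ['A', 'C'], 'K': ['G', 'T'], 'S': ['G', 'C'],
--                  'W': ['A', 'T'], 'H': ['A', 'T', 'C'], 'B': ['G', 'T', 'C'], 'V': ['G', 'A', 'C'],
--                  'D': ['G', 'A', 'T'], 'N': ['A', 'T', 'C', 'G']}
--
-- def ham_distance0(seq0, seq1):
--     # Stage 1: aggregate the alignment into a histogram of distinct aligned pairs.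
--     pair_counts = {}
--     for p in zip(seq0, seq1):
--         pair_counts[p] = pair_counts.get(p, 0) + 1
--     # Stage 2: one membership test per DISTINCT pair type, weighted by its multiplicity.
--     count = 0
--     for (xi, yi), c in pair_counts.items():
--         if xi != yi and xi not in dict_deg_base.get(yi, []):
--             count += c
--     return count
-- ===== Notes on version B (the rewrite author's own statement) =====
-- stated objective: alternative
-- what changed: Replaces A's single per-position nested-branch counting loop with a two-stage aggregation: first build a histogram of distinct aligned character pairs, then sum the multiplicities of the pair types that fail one flat compatibility test, so the branching runs once per distinct pair type instead of once per position.
import Mathlib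
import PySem

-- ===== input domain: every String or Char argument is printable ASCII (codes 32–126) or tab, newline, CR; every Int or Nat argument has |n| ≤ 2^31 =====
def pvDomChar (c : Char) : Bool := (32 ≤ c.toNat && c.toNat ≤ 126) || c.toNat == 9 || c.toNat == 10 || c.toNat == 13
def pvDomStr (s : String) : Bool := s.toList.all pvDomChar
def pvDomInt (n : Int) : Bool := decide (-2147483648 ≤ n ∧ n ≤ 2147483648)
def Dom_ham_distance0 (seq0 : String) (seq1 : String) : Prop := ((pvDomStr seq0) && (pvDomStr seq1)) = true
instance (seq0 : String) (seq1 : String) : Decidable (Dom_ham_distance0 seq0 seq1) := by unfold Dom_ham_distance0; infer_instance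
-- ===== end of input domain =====

-- B replaces A's per-position nested-branch loop with a two-stage aggregation: a histogram
-- of distinct aligned pairs, then one weighted compatibility test per pair type (objective: alternative).

-- ===== PORT A =====
def lst_deg_base : List Char := ['R', 'Y', 'M', 'K', 'S', 'W', 'H', 'B', 'V', 'D', 'N']

def dict_deg_base : PySem.Dict Char (List Char) :=
  PySem.Dict.mk [('R', ['A', 'G']), ('Y', ['C', 'T']), ('M', ['A', 'C']), ('K', ['G', 'T']),
                 ('S', ['G', 'C']), ('W', ['A', 'T']), ('H', ['A', 'T', 'C']), ('B', ['G', 'T', 'C']),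
                 ('V', ['G', 'A', 'C']), ('D', ['G', 'A', 'T']), ('N', ['A', 'T', 'C', 'G'])]

def ham_distance0 (seq0 : String) (seq1 : String) : Int :=
  (List.zip seq0.toList seq1.toList).foldl
    (fun count p =>
      if p.1 ≠ p.2 then
        if lst_deg_base.contains p.2 then
          -- dict_deg_base[yi]: the lookup is guarded by the membership test, so it never misses
          let lst_yi := (dict_deg_base.get? p.2).getD []
          if ¬ lst_yi.contains p.1 then count + 1 else count
        else count + 1
      else count) 0

-- ===== PORT B =====
-- Stage 1: pair_counts[p] = pair_counts.get(p, 0) + 1 over zip(seq0, seq1)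
def pair_counts (seq0 : String) (seq1 : String) : PySem.Dict (Char × Char) Int :=
  (List.zip seq0.toList seq1.toList).foldl
    (fun d p => d.insert p (d.getD p 0 + 1)) PySem.Dict.empty

-- Stage 2: sum the multiplicities of the incompatible pair types
def ham_distance0_alt (seq0 : String) (seq1 : String) : Int :=
  (pair_counts seq0 seq1).items.foldl
    (fun count it =>
      if it.1.1 ≠ it.1.2 ∧ ¬ ((dict_deg_base.get? it.1.2).getD []).contains it.1.1
      then count + it.2 else count) 0

-- ===== PRECONDITION & SPEC =====
def Spec_ham_distance0 (seq0 : String) (seq1 : String) (out : Int) : Prop := out = ham_distance0_alt seq0 seq1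
instance (seq0 : String) (seq1 : String) (out : Int) : Decidable (Spec_ham_distance0 seq0 seq1 out) := by unfold Spec_ham_distance0; infer_instance

-- ===== CLAIM (what is proved, stated in full; the proofs are below) =====
def Claim_equal_ham_distance0 : Prop := ∀ (seq0 : String) (seq1 : String), Dom_ham_distance0 seq0 seq1 → Spec_ham_distance0 seq0 seq1 (ham_distance0 seq0 seq1)

-- ===== LEMMAS AND PROOFS =====

-- the common mismatch predicate both sides compute
def badP (p : Char × Char) : Bool :=
  p.1 != p.2 && !(((dict_deg_base.get? p.2).getD []).contains p.1)

-- a key absent from lst_deg_base is absent from dict_deg_base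
theorem get?_none_of_not_deg (y : Char) (h : y ∉ lst_deg_base) :
    dict_deg_base.get? y = none := by
  simp only [lst_deg_base, List.mem_cons, List.not_mem_nil, or_false, not_or] at h
  obtain ⟨h1, h2, h3, h4, h5, h6, h7, h8, h9, h10, h11⟩ := h
  simp [dict_deg_base, PySem.Dict.get?_mk_cons, PySem.Dict.get?,
    (beq_iff_eq ..).ne.mpr (fun h => h1 h.symm), (beq_iff_eq ..).ne.mpr (fun h => h2 h.symm),
    (beq_iff_eq ..).ne.mpr (fun h => h3 h.symm), (beq_iff_eq ..).ne.mpr (fun h => h4 h.symm),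
    (beq_iff_eq ..).ne.mpr (fun h => h5 h.symm), (beq_iff_eq ..).ne.mpr (fun h => h6 h.symm),
    (beq_iff_eq ..).ne.mpr (fun h => h7 h.symm), (beq_iff_eq ..).ne.mpr (fun h => h8 h.symm),
    (beq_iff_eq ..).ne.mpr (fun h => h9 h.symm), (beq_iff_eq ..).ne.mpr (fun h => h10 h.symm),
    (beq_iff_eq ..).ne.mpr (fun h => h11 h.symm)]

-- A's nested branches increment exactly when badP holds
theorem stepA_eq (c : Int) (p : Char × Char) :
    (if p.1 ≠ p.2 then
        if lst_deg_base.contains p.2 then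
          let lst_yi := (dict_deg_base.get? p.2).getD []
          if ¬ lst_yi.contains p.1 then c + 1 else c
        else c + 1
      else c)
    = (if badP p then c + 1 else c) := by
  obtain ⟨x, y⟩ := p
  by_cases hxy : x = y
  · simp [badP, hxy]
  · by_cases hmem : y ∈ lst_deg_base
    · have hcon : lst_deg_base.contains y = true := by simpa using hmem
      cases hc : ((dict_deg_base.get? y).getD []).contains x <;>
        simp [badP, hcon, hxy, hc] <;>
        exact fun h => absurd hmem h
    · have hcon : lst_deg_base.contains y = false := by simpa using hmem
      have hget := get?_none_of_not_deg y hmem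
      simp [badP, hcon, hget, hxy]

-- A's loop counts badP
theorem foldA_count (zs : List (Char × Char)) (c : Int) :
    zs.foldl (fun c p => if badP p then c + 1 else c) c = c + (zs.countP badP : Int) := by
  induction zs generalizing c with
  | nil => simp
  | cons z zs ih =>
      by_cases h : badP z <;> simp [List.countP_cons, h, ih] <;> push_cast <;> ring

-- a conditional accumulating fold is a sum
theorem fold_sum {α : Type} (f : α → Int) (P : α → Prop) [DecidablePred P]
    (l : List α) (c : Int) :
    l.foldl (fun c a => if P a then c + f a else c) c
      = c + (l.map (fun a => if P a then f a else 0)).sum := by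
  induction l generalizing c with
  | nil => simp
  | cons a l ih => by_cases h : P a <;> simp [h, ih] <;> ring

-- summing (if k = z then c else 0) over a Nodup list containing z gives c
theorem sum_single {α : Type} [DecidableEq α] (ks : List α) (hnd : ks.Nodup)
    (z : α) (hz : z ∈ ks) (c : Int) :
    (ks.map (fun k => if k = z then c else 0)).sum = c := by
  induction ks with
  | nil => simp at hz
  | cons a ks ih =>
      obtain ⟨ha, hnd'⟩ := List.nodup_cons.mp hnd
      rcases List.mem_cons.mp hz with rfl | h
      · have h0 : (ks.map (fun k => if k = z then c else 0)).sum = 0 := by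
          apply List.sum_eq_zero; intro x hx
          obtain ⟨k, hk, rfl⟩ := List.mem_map.mp hx
          have : k ≠ z := fun he => ha (he ▸ hk)
          simp [this]
        simp [h0]
      · have hne : a ≠ z := fun he => ha (he ▸ h)
        simp [hne, ih hnd' h]

-- summing P-weighted multiplicities over every distinct element equals countP
theorem sum_counts {α : Type} [BEq α] [LawfulBEq α] [DecidableEq α] (P : α → Prop) [DecidablePred P]
    (ks : List α) (hnd : ks.Nodup) (zs : List α) (hsub : ∀ z ∈ zs, z ∈ ks) :
    (ks.map (fun k => if P k then (zs.count k : Int) else 0)).sum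
      = (zs.countP fun z => decide (P z) : Int) := by
  induction zs with
  | nil => simp [List.sum_eq_zero]
  | cons z zs ih =>
      have hz : z ∈ ks := hsub z List.mem_cons_self
      have hsub' : ∀ w ∈ zs, w ∈ ks := fun w hw => hsub w (List.mem_cons_of_mem _ hw)
      have hpt : ∀ k ∈ ks, (if P k then ((z :: zs).count k : Int) else 0)
          = (if P k then (zs.count k : Int) else 0)
            + (if k = z then (if P z then (1 : Int) else 0) else 0) := by
        intro k _
        by_cases hkz : k = z
        · subst hkz
          by_cases hPk : P k <;> simp [hPk, List.count_cons] <;> try (push_cast; ring)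
        · have hzk : ¬ z = k := fun he => hkz he.symm
          by_cases hPk : P k <;> simp [hPk, hkz, hzk, List.count_cons]
      rw [List.map_congr_left hpt, List.sum_map_add, ih hsub',
        sum_single ks hnd z hz]
      by_cases hPz : P z <;> simp [List.countP_cons, hPz] <;> try (push_cast; ring)

-- A computes countP badP over the zipped sequences
theorem A_eq (seq0 seq1 : String) :
    ham_distance0 seq0 seq1
      = ((List.zip seq0.toList seq1.toList).countP badP : Int) := by
  unfold ham_distance0
  rw [PySem.List.foldl_congr_mem
        (l := List.zip seq0.toList seq1.toList) (init := (0 : Int))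
        (f := fun count p =>
          if p.1 ≠ p.2 then
            if lst_deg_base.contains p.2 then
              let lst_yi := (dict_deg_base.get? p.2).getD []
              if ¬ lst_yi.contains p.1 then count + 1 else count
            else count + 1
          else count)
        (g := fun c p => if badP p then c + 1 else c)
        (fun acc x _ => stepA_eq acc x),
      foldA_count]
  ring

-- B computes countP badP over the zipped sequences
theorem B_eq (seq0 seq1 : String) :
    ham_distance0_alt seq0 seq1
      = ((List.zip seq0.toList seq1.toList).countP badP : Int) := by
  unfold ham_distance0_alt pair_counts
  rw [PySem.Dict.foldl_insert_getD_add_one_eq_counter,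
      fold_sum (fun it => it.2)
        (fun it : (Char × Char) × Int =>
          it.1.1 ≠ it.1.2 ∧ ¬ ((dict_deg_base.get? it.1.2).getD []).contains it.1.1),
      PySem.Dict.items_counter, List.map_map]
  set zs := List.zip seq0.toList seq1.toList with hzs
  rw [show ((fun it : (Char × Char) × Int =>
          if it.1.1 ≠ it.1.2 ∧ ¬ ((dict_deg_base.get? it.1.2).getD []).contains it.1.1
          then it.2 else 0) ∘ fun k => (k, (zs.count k : Int)))
        = (fun k : Char × Char =>
            if (k.1 ≠ k.2 ∧ ¬ ((dict_deg_base.get? k.2).getD []).contains k.1)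
            then (zs.count k : Int) else 0) from rfl,
      zero_add]
  have h := sum_counts (fun p : Char × Char =>
          p.1 ≠ p.2 ∧ ¬ ((dict_deg_base.get? p.2).getD []).contains p.1)
        (PySem.Set.ofList zs) (PySem.Set.nodup_ofList zs) zs
        (fun z hz => (PySem.Set.mem_ofList zs z).mpr hz)
  have hfn : (fun z : Char × Char =>
      decide (z.1 ≠ z.2 ∧ ¬ ((dict_deg_base.get? z.2).getD []).contains z.1)) = badP := by
    funext p; by_cases hp : p.1 = p.2 <;> simp [badP, hp]
  rw [hfn] at h
  exact h

-- ===== VERDICT (by name: the statement is the Claim_ definition above) =====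
theorem ham_distance0_spec : Claim_equal_ham_distance0 := by
  intro seq0 seq1 _
  unfold Spec_ham_distance0
  rw [A_eq, B_eq]
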